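-- pv_equiv track=rewrite | github.com/AP-MI-2021/lab-4-gloriarobas | main.py | inlocuire
-- ===== SOURCE A (Python) =====
-- def cmmdc(a,b):
--     while (a != b):
--         if (a > b):
--             a = a - b
--         else:
--             b = b - a
--     return a
--
-- def oglindit(n):
--     nr=0
--     numar=abs(n)
--     while numar!=0:
--         nr=nr*10+numar%10
--         numar=numar//10
--     return -nr
--
-- def inlocuire(list):
--     rezultat=[]
--     pozitive=[]
--     for x in list:
--         if x>0:
--             pozitive.append(x)
--     a=pozitive[0]
--     b=pozitive[1]
--     c=cmmdc(a,b)
--     i=2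
--     while i<len(pozitive):
--         if pozitive[i]%c!=0:
--             c=cmmdc(c,pozitive[i])
--         i=i+1
--     for x in list:
--         if x>0:
--             rezultat.append(c)
--         else:
--             rezultat.append(oglindit(x))
--     return rezultat
-- ===== SOURCE B (Python) =====
-- def _gcd(a, b):
--     while b:
--         a, b = b, a % b
--     return a
--
--
-- def _rev(m, acc=0):
--     return acc if m == 0 else _rev(m // 10, acc * 10 + m % 10)
--
--
-- def inlocuire(list):
--     g = None
--     for x in list:
--         if x > 0:
--             g = x if g is None else _gcd(g, x)
--     return [g if x > 0 else -_rev(abs(x)) for x in list]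
-- ===== Notes on version B (the rewrite author's own statement) =====
-- stated objective: alternative
-- what changed: B computes the GCD of the positives in one guarded pass with a modulo-based Euclidean algorithm and builds the result with a single comprehension, instead of A's separate positives list, subtraction-loop GCD with a divisibility-skip index loop, and append loop.
import Mathlib
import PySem

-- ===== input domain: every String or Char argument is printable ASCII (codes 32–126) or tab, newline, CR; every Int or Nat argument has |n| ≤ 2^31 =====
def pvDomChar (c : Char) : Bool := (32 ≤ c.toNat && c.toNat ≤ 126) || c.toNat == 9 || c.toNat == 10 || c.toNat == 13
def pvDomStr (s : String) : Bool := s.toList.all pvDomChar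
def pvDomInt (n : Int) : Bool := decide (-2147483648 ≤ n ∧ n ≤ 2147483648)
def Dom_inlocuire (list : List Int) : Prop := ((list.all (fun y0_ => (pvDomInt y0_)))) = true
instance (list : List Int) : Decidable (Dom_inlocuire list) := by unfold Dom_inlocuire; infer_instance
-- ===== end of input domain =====

-- B replaces A's subtraction-loop GCD (and its divisibility skip over a separate positives list)
-- by a single guarded pass folding a modulo-based Euclidean GCD, and builds the output by a map;
-- objective: alternative (a genuinely different algorithm of similar measured cost).

-- ===== PORT A =====
-- while (a != b): if a > b: a = a - b else: b = b - a   (fuel a.toNat+b.toNat suffices for positive a, b)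
def cmmdcLoop : Nat → Int → Int → Int
  | 0, a, _ => a
  | f + 1, a, b => if a ≠ b then (if a > b then cmmdcLoop f (a - b) b else cmmdcLoop f a (b - a)) else a

def cmmdc (a b : Int) : Int := cmmdcLoop (a.toNat + b.toNat) a b

-- while numar != 0: nr = nr*10 + numar%10; numar = numar//10   (fuel |n|+1 suffices: numar starts at |n| ≥ 0)
def oglLoop : Nat → Int → Int → Int
  | 0, nr, _ => nr
  | f + 1, nr, numar =>
      if numar ≠ 0 then oglLoop f (nr * 10 + PySem.Int.mod numar 10) (PySem.Int.floordiv numar 10) else nr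

def oglindit (n : Int) : Int := -(oglLoop (n.natAbs + 1) 0 |n|)

def inlocuire (list : List Int) : List Int :=
  let pozitive := list.foldl (fun acc x => if x > 0 then acc ++ [x] else acc) []
  match PySem.List.pyGet? pozitive 0, PySem.List.pyGet? pozitive 1 with
  | some a, some b =>
    let c := (PySem.List.pyRange 2 (PySem.List.len pozitive) 1).foldl
        (fun c i => if PySem.Int.mod (PySem.List.pyGetD pozitive i 0) c ≠ 0
                    then cmmdc c (PySem.List.pyGetD pozitive i 0) else c)
        (cmmdc a b)
    list.foldl (fun acc x => if x > 0 then acc ++ [c] else acc ++ [oglindit x]) []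
  | _, _ => []  -- pozitive[0] / pozitive[1] raises IndexError in Python; excluded by Pre_

-- ===== PORT B =====
-- while b: a, b = b, a % b   (fuel b.toNat+1 suffices: for b > 0, a % b < b strictly decreases)
def egcdLoop : Nat → Int → Int → Int
  | 0, a, _ => a
  | f + 1, a, b => if b ≠ 0 then egcdLoop f b (PySem.Int.mod a b) else a

def egcd (a b : Int) : Int := egcdLoop (b.toNat + 1) a b

-- _rev(m, acc): acc if m == 0 else _rev(m // 10, acc*10 + m%10)   (fuel |m|+1 suffices for m ≥ 0)
def revLoop : Nat → Int → Int → Int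
  | 0, _, acc => acc
  | f + 1, m, acc => if m = 0 then acc else revLoop f (PySem.Int.floordiv m 10) (acc * 10 + PySem.Int.mod m 10)

def pyRev (m : Int) : Int := revLoop (m.natAbs + 1) m 0

def inlocuire_alt (list : List Int) : List Int :=
  let g := list.foldl
      (fun g x => if 0 < x then some (match g with | none => x | some v => egcd v x) else g)
      (none : Option Int)
  list.map (fun x => if 0 < x then g.getD 0 else -(pyRev |x|))

-- ===== PRECONDITION & SPEC =====
-- Pre_ excludes exactly the inputs with fewer than two positive elements, on which
-- A raises IndexError at pozitive[0] / pozitive[1].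
def Pre_inlocuire (list : List Int) : Prop := 2 ≤ (list.filter (fun x => decide (0 < x))).length
instance (list : List Int) : Decidable (Pre_inlocuire list) := by unfold Pre_inlocuire; infer_instance

def pvWitness_inlocuire : List Int := [4, 6, -12]

def Spec_inlocuire (list : List Int) (out : List Int) : Prop := out = inlocuire_alt list
instance (list : List Int) (out : List Int) : Decidable (Spec_inlocuire list out) := by unfold Spec_inlocuire; infer_instance

-- ===== CLAIM (what is proved, stated in full; the proofs are below) =====
def Claim_equal_inlocuire : Prop := ∀ (list : List Int), Dom_inlocuire list → Pre_inlocuire list → Spec_inlocuire list (inlocuire list)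

-- ===== LEMMAS AND PROOFS =====

-- A's subtraction loop computes gcd on positive arguments (fuel a.toNat + b.toNat - 2 steps suffice).
lemma cmmdcLoop_gcd : ∀ (f : Nat) (a b : Int), 0 < a → 0 < b → a.toNat + b.toNat ≤ f + 2 →
    cmmdcLoop f a b = Int.gcd a b := by
  intro f
  induction f with
  | zero =>
    intro a b ha hb hf
    have h1 : a = 1 := by omega
    have h2 : b = 1 := by omega
    subst h1; subst h2
    decide
  | succ f ih =>
    intro a b ha hb hf
    show (if a ≠ b then (if a > b then cmmdcLoop f (a - b) b else cmmdcLoop f a (b - a)) else a) = _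
    by_cases hab : a = b
    · subst hab
      simp [Int.gcd_self, Int.natAbs_of_nonneg ha.le]
    · simp only [if_pos hab]
      by_cases hgt : a > b
      · rw [if_pos hgt, ih (a - b) b (by omega) hb (by omega)]
        congr 1
        rw [Int.gcd_comm, show a - b = a - 1 * b by ring, Int.gcd_sub_mul_right_right,
          Int.gcd_comm]
      · rw [if_neg hgt, ih a (b - a) ha (by omega) (by omega)]
        congr 1
        rw [show b - a = b - 1 * a by ring, Int.gcd_sub_mul_right_right]

lemma cmmdc_gcd (a b : Int) (ha : 0 < a) (hb : 0 < b) : cmmdc a b = Int.gcd a b :=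
  cmmdcLoop_gcd _ a b ha hb (by omega)

-- B's modulo loop computes gcd for 0 < a, 0 ≤ b (fuel b.toNat steps suffice).
lemma egcdLoop_gcd : ∀ (f : Nat) (a b : Int), 0 < a → 0 ≤ b → b.toNat ≤ f →
    egcdLoop f a b = Int.gcd a b := by
  intro f
  induction f with
  | zero =>
    intro a b ha hb hf
    have h0 : b = 0 := by omega
    subst h0
    show a = _
    rw [Int.gcd_zero_right, Int.natAbs_of_nonneg ha.le]
  | succ f ih =>
    intro a b ha hb hf
    show (if b ≠ 0 then egcdLoop f b (PySem.Int.mod a b) else a) = _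
    by_cases hb0 : b = 0
    · subst hb0
      simp [Int.natAbs_of_nonneg ha.le]
    · have hbpos : 0 < b := by omega
      have hmlt := PySem.Int.mod_lt a hbpos
      have hmnn := PySem.Int.mod_nonneg a hbpos
      rw [if_pos hb0, ih b (PySem.Int.mod a b) hbpos hmnn (by omega)]
      congr 1
      have hm : PySem.Int.mod a b = a - PySem.Int.floordiv a b * b := by
        have := PySem.Int.floordiv_mul_add_mod a b; linarith
      rw [hm, Int.gcd_sub_mul_right_right, Int.gcd_comm]

-- A's index loop (with its divisibility skip) is the plain gcd fold, on positive inputs.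
lemma fold_stepA : ∀ (l : List Int) (c : Int), 0 < c → (∀ x ∈ l, 0 < x) →
    l.foldl (fun c x => if PySem.Int.mod x c ≠ 0 then cmmdc c x else c) c
      = l.foldl (fun c x => ((Int.gcd c x : Nat) : Int)) c := by
  intro l
  induction l with
  | nil => intro c _ _; rfl
  | cons x l ih =>
    intro c hc hl
    have hx : 0 < x := hl x List.mem_cons_self
    have hstep : (if PySem.Int.mod x c ≠ 0 then cmmdc c x else c) = ((Int.gcd c x : Nat) : Int) := by
      by_cases hm : PySem.Int.mod x c = 0
      · have hdvd : c ∣ x := (PySem.Int.mod_eq_zero_iff_dvd x c).mp hm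
        simp [hm, Int.gcd_eq_left hc.le hdvd]
      · simp only [if_pos hm]
        exact cmmdc_gcd c x hc hx
    have hpos : (0 : Int) < ((Int.gcd c x : Nat) : Int) := by
      exact_mod_cast Int.gcd_pos_iff.mpr (Or.inl (by omega))
    simp only [List.foldl_cons, hstep]
    exact ih _ hpos (fun y hy => hl y (List.mem_cons_of_mem _ hy))

-- B's egcd fold is the plain gcd fold, on positive inputs.
lemma fold_stepB : ∀ (l : List Int) (c : Int), 0 < c → (∀ x ∈ l, 0 < x) →
    l.foldl (fun v x => egcd v x) c = l.foldl (fun c x => ((Int.gcd c x : Nat) : Int)) c := by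
  intro l
  induction l with
  | nil => intro c _ _; rfl
  | cons x l ih =>
    intro c hc hl
    have hx : 0 < x := hl x List.mem_cons_self
    have hstep : egcd c x = ((Int.gcd c x : Nat) : Int) :=
      egcdLoop_gcd _ c x hc hx.le (by omega)
    simp only [List.foldl_cons, hstep]
    have hpos : (0 : Int) < ((Int.gcd c x : Nat) : Int) := by
      exact_mod_cast Int.gcd_pos_iff.mpr (Or.inl (by omega))
    exact ih _ hpos (fun y hy => hl y (List.mem_cons_of_mem _ hy))

-- B's guarded accumulator over the whole list = the unguarded accumulator over the positives.
lemma foldB_filter : ∀ (l : List Int) (g : Option Int),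
    l.foldl (fun g x => if 0 < x then some (match g with | none => x | some v => egcd v x) else g) g
      = (l.filter (fun x => decide (0 < x))).foldl
          (fun g x => some (match g with | none => x | some v => egcd v x)) g := by
  intro l
  induction l with
  | nil => intro g; rfl
  | cons x l ih =>
    intro g
    by_cases hx : 0 < x
    · simp [hx, ih]
    · simp [hx, ih]

lemma foldB_some : ∀ (l : List Int) (v : Int),
    l.foldl (fun g x => some (match g with | none => x | some v => egcd v x)) (some v)
      = some (l.foldl (fun v x => egcd v x) v) := by
  intro l
  induction l with
  | nil => intro v; rfl
  | cons x l ih => intro v; simpa using ih (egcd v x)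

-- A's digit-reversal loop and B's tail-recursive _rev are the same recursion.
lemma oglLoop_eq_revLoop : ∀ (f : Nat) (nr numar : Int), oglLoop f nr numar = revLoop f numar nr := by
  intro f
  induction f with
  | zero => intro nr numar; rfl
  | succ f ih =>
    intro nr numar
    show (if numar ≠ 0 then oglLoop f (nr * 10 + PySem.Int.mod numar 10) (PySem.Int.floordiv numar 10) else nr)
        = (if numar = 0 then nr else revLoop f (PySem.Int.floordiv numar 10) (nr * 10 + PySem.Int.mod numar 10))
    by_cases h : numar = 0
    · simp [h]
    · simp [h, ih]

lemma oglindit_eq_pyRev (x : Int) : oglindit x = -(pyRev |x|) := by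
  unfold oglindit pyRev
  rw [oglLoop_eq_revLoop, Int.natAbs_abs]

-- ===== VERDICT (by name: the statement is the Claim_ definition above) =====
theorem inlocuire_spec : Claim_equal_inlocuire := by
  unfold Claim_equal_inlocuire
  intro list _ hpre
  unfold Spec_inlocuire Pre_inlocuire at *
  unfold inlocuire inlocuire_alt
  rw [PySem.List.foldl_append_ite_eq_filter (fun x => 0 < x) list []]
  rw [foldB_filter]
  simp only [List.nil_append]
  set P := list.filter (fun x => decide (0 < x)) with hPdef
  have hpos : ∀ x ∈ P, 0 < x := by
    intro x hx
    have := (List.mem_filter.mp hx).2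
    simpa using this
  obtain ⟨p0, p1, rest, hP⟩ : ∃ p0 p1 rest, P = p0 :: p1 :: rest := by
    match P, hpre with
    | p0 :: p1 :: rest, _ => exact ⟨p0, p1, rest, rfl⟩
  rw [hP]
  have hp0 : 0 < p0 := hpos p0 (hP ▸ List.mem_cons_self)
  have hp1 : 0 < p1 := hpos p1 (hP ▸ List.mem_cons_of_mem _ List.mem_cons_self)
  have hrest : ∀ x ∈ rest, 0 < x := fun x hx =>
    hpos x (hP ▸ List.mem_cons_of_mem _ (List.mem_cons_of_mem _ hx))
  -- reduce the two indexings
  have hg0 : PySem.List.pyGet? (p0 :: p1 :: rest) 0 = some p0 := by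
    have h : (0:Int) ≤ (rest.length:Int) + 1 := by positivity
    simp [PySem.List.pyGet?, PySem.List.pyIdx?, h]
  have hg1 : PySem.List.pyGet? (p0 :: p1 :: rest) 1 = some p1 := by
    simp [PySem.List.pyGet?, PySem.List.pyIdx?]
  rw [hg0, hg1]
  dsimp only
  -- A's index loop over range(2, len) = fold over rest
  rw [PySem.List.foldl_pyRange_pyGetD (p0 :: p1 :: rest) 0
    (fun c x => if PySem.Int.mod x c ≠ 0 then cmmdc c x else c) (cmmdc p0 p1) (by norm_num)]
  have hdrop : List.drop (2 : Int).toNat (p0 :: p1 :: rest) = rest := rfl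
  rw [hdrop]
  -- both gcd accumulations equal the plain gcd fold
  have hgpos : (0 : Int) < ((Int.gcd p0 p1 : Nat) : Int) := by
    exact_mod_cast Int.gcd_pos_iff.mpr (Or.inl (by omega))
  have hA : rest.foldl (fun c x => if PySem.Int.mod x c ≠ 0 then cmmdc c x else c) (cmmdc p0 p1)
      = rest.foldl (fun c x => ((Int.gcd c x : Nat) : Int)) ((Int.gcd p0 p1 : Nat) : Int) := by
    rw [cmmdc_gcd p0 p1 hp0 hp1]
    exact fold_stepA rest _ hgpos hrest
  have hB : (p0 :: p1 :: rest).foldl (fun g x => some (match g with | none => x | some v => egcd v x)) none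
      = some (rest.foldl (fun c x => ((Int.gcd c x : Nat) : Int)) ((Int.gcd p0 p1 : Nat) : Int)) := by
    show (p1 :: rest).foldl (fun g x => some (match g with | none => x | some v => egcd v x)) (some p0) = _
    show rest.foldl (fun g x => some (match g with | none => x | some v => egcd v x)) (some (egcd p0 p1)) = _
    rw [foldB_some]
    congr 1
    rw [show egcd p0 p1 = ((Int.gcd p0 p1 : Nat) : Int) from egcdLoop_gcd _ p0 p1 hp0 hp1.le (by omega)]
    exact fold_stepB rest _ hgpos hrest
  rw [hA, hB]
  set G := rest.foldl (fun c x => ((Int.gcd c x : Nat) : Int)) ((Int.gcd p0 p1 : Nat) : Int) with hG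
  -- A's output loop is a map
  have hfun : (fun (acc : List Int) (x : Int) => if x > 0 then acc ++ [G] else acc ++ [oglindit x])
      = fun acc x => acc ++ [if x > 0 then G else oglindit x] := by
    funext acc x
    split_ifs <;> rfl
  rw [hfun, PySem.List.foldl_append_singleton_eq_map]
  simp only [List.nil_append, Option.getD_some]
  apply List.map_congr_left
  intro x _
  by_cases hx : 0 < x
  · simp [hx]
  · simp [hx, oglindit_eq_pyRev]
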